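-- pv_equiv track=rewrite | github.com/farleyknight/contract-clause-classification | analysis/error_analysis.py | compute_class_vocabularies
-- ===== SOURCE A (Python) =====
-- def compute_class_vocabularies(texts, labels, label_names):
--     """Build a vocabulary set for each class from the training data."""
--     class_vocabs = {}
--     for text, label in zip(texts, labels):
--         name = label_names[label]
--         if name not in class_vocabs:
--             class_vocabs[name] = set()
--         words = set(text.lower().split())
--         class_vocabs[name].update(words)
--     return class_vocabs
-- ===== SOURCE B (Python) =====
-- def compute_class_vocabularies(texts, labels, label_names):
--     """Build a vocabulary set for each class from the training data."""
--     pairs = list(zip(texts, labels))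
--     names = list(dict.fromkeys(label_names[l] for _, l in pairs))
--     result = {}
--     for name in names:
--         vocab = set()
--         for text, l in pairs:
--             if label_names[l] == name:
--                 vocab.update(text.lower().split())
--         result[name] = vocab
--     return result
-- ===== Notes on version B (the rewrite author's own statement) =====
-- stated objective: alternative
-- what changed: B first collects the distinct class names present (first-occurrence order), then builds each class's vocabulary with an outer loop over names and an inner scan of the (text,label) pairs, instead of A's single accumulating pass keyed by a dict.
import Mathlib
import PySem

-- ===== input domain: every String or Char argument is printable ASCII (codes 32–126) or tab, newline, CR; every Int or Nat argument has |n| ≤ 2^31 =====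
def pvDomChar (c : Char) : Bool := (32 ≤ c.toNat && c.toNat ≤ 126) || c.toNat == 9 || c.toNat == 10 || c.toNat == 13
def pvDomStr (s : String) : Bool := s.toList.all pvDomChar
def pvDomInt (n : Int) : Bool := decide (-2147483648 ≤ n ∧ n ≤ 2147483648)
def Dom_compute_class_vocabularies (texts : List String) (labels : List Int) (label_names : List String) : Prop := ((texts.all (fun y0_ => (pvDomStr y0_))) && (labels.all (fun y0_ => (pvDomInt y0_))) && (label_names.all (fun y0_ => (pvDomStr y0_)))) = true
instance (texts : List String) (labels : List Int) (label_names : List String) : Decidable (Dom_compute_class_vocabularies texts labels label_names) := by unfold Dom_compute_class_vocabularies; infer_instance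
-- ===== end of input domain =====

-- B builds the dict with an outer loop over the distinct class names present and an inner scan of the
-- (text, label) pairs per name, instead of A's single accumulating pass; same return value (alternative).

-- shared primitives: label_names[label] (total form; Pre_ excludes out-of-range labels) and text.lower().split()
def pvName (label_names : List String) (l : Int) : String := (PySem.List.pyGet? label_names l).getD ""
def pvWords (t : String) : List String := PySem.Str.split₀ (PySem.Str.lower t)

-- ===== PORT A =====
def pvStepA (label_names : List String) (d : PySem.Dict String (PySem.Set String))
    (p : String × Int) : PySem.Dict String (PySem.Set String) :=
  let name := pvName label_names p.2
  let d1 := if d.contains name then d else d.insert name PySem.Set.empty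
  let words := PySem.Set.ofList (pvWords p.1)
  d1.modify name PySem.Set.empty (fun s => PySem.Set.update s words)

def compute_class_vocabularies (texts : List String) (labels : List Int) (label_names : List String) : List (String × List String) :=
  ((texts.zip labels).foldl (pvStepA label_names) PySem.Dict.empty).items

-- ===== PORT B =====
-- inner scan of B: union the words of every pair whose label maps to n into the accumulator
def pvVocabFrom (label_names : List String) (s : PySem.Set String)
    (pairs : List (String × Int)) (n : String) : PySem.Set String :=
  pairs.foldl (fun s p => if pvName label_names p.2 = n then PySem.Set.update s (pvWords p.1) else s) s

def compute_class_vocabularies_alt (texts : List String) (labels : List Int) (label_names : List String) : List (String × List String) :=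
  let pairs := texts.zip labels
  let names := PySem.List.dedup (pairs.map (fun p => pvName label_names p.2))
  names.map (fun n => (n, pvVocabFrom label_names PySem.Set.empty pairs n))

-- ===== PRECONDITION & SPEC =====
-- Pre_ excludes exactly the inputs where Python raises IndexError: a label in the zipped prefix out of range of label_names
def Pre_compute_class_vocabularies (texts : List String) (labels : List Int) (label_names : List String) : Prop :=
  ∀ p ∈ texts.zip labels, PySem.Raise.InRange label_names.length p.2
instance (texts : List String) (labels : List Int) (label_names : List String) : Decidable (Pre_compute_class_vocabularies texts labels label_names) := by unfold Pre_compute_class_vocabularies; infer_instance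

def pvWitness_compute_class_vocabularies : List String × List Int × List String :=
  (["A b", "b C", "a"], [0, 1, 0], ["x", "y"])

def Spec_compute_class_vocabularies (texts : List String) (labels : List Int) (label_names : List String) (out : List (String × List String)) : Prop := out = compute_class_vocabularies_alt texts labels label_names
instance (texts : List String) (labels : List Int) (label_names : List String) (out : List (String × List String)) : Decidable (Spec_compute_class_vocabularies texts labels label_names out) := by unfold Spec_compute_class_vocabularies; infer_instance

-- ===== CLAIM (what is proved, stated in full; the proofs are below) =====
def Claim_equal_compute_class_vocabularies : Prop := ∀ (texts : List String) (labels : List Int) (label_names : List String), Dom_compute_class_vocabularies texts labels label_names → Pre_compute_class_vocabularies texts labels label_names → Spec_compute_class_vocabularies texts labels label_names (compute_class_vocabularies texts labels label_names)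

-- ===== LEMMAS AND PROOFS =====

-- updating with a deduplicated list adds the same elements in the same order
theorem pv_update_ofList (s : PySem.Set String) (ws : List String) :
    PySem.Set.update s (PySem.Set.ofList ws) = PySem.Set.update s ws := by
  rw [PySem.Set.update_eq_append_filter, PySem.Set.update_eq_append_filter, PySem.Set.ofList_ofList]

theorem pv_keys_stepA (ln : List String) (d : PySem.Dict String (PySem.Set String)) (p : String × Int) :
    (pvStepA ln d p).keys = PySem.Set.add d.keys (pvName ln p.2) := by
  by_cases h : d.contains (pvName ln p.2) = true
  · have hm : pvName ln p.2 ∈ d.keys := (PySem.Dict.contains_iff_mem_keys _ _).mp h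
    simp [pvStepA, h, PySem.Dict.keys_insert_of_contains, hm]
  · have h' : d.contains (pvName ln p.2) = false := by simpa using h
    have hm : pvName ln p.2 ∉ d.keys := fun hm => h ((PySem.Dict.contains_iff_mem_keys _ _).mpr hm)
    simp [pvStepA, h', PySem.Dict.insert_insert_self, PySem.Dict.keys_insert_of_not_contains, hm]

theorem pv_keys_fold (ln : List String) (zs : List (String × Int)) :
    ∀ d : PySem.Dict String (PySem.Set String),
    (zs.foldl (pvStepA ln) d).keys = PySem.Set.update d.keys (zs.map (fun p => pvName ln p.2)) := by
  induction zs with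
  | nil => intro d; simp [PySem.Set.update_nil]
  | cons z zs ih =>
    intro d
    simp only [List.foldl_cons, List.map_cons, PySem.Set.update_cons, ih, pv_keys_stepA]

theorem pv_getD_stepA (ln : List String) (d : PySem.Dict String (PySem.Set String)) (p : String × Int) (n : String) :
    (pvStepA ln d p).getD n PySem.Set.empty =
      if pvName ln p.2 = n then PySem.Set.update (d.getD n PySem.Set.empty) (pvWords p.1)
      else d.getD n PySem.Set.empty := by
  by_cases hn : pvName ln p.2 = n
  · subst hn
    rw [if_pos rfl]
    by_cases hc : d.contains (pvName ln p.2) = true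
    · simp [pvStepA, hc, pv_update_ofList]
    · have hc' : d.contains (pvName ln p.2) = false := by simpa using hc
      simp [pvStepA, hc', PySem.Dict.getD_insert_self,
        pv_update_ofList, PySem.Dict.getD_of_not_contains _ _ hc']
  · have hn' : n ≠ pvName ln p.2 := fun e => hn e.symm
    rw [if_neg hn]
    by_cases hc : d.contains (pvName ln p.2) = true
    · simp [pvStepA, hc, PySem.Dict.getD_modify, hn']
    · have hc' : d.contains (pvName ln p.2) = false := by simpa using hc
      simp [pvStepA, hc', PySem.Dict.getD_modify, PySem.Dict.getD_insert, hn']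

theorem pv_getD_fold (ln : List String) (zs : List (String × Int)) :
    ∀ (d : PySem.Dict String (PySem.Set String)) (n : String),
    (zs.foldl (pvStepA ln) d).getD n PySem.Set.empty =
      pvVocabFrom ln (d.getD n PySem.Set.empty) zs n := by
  induction zs with
  | nil => intro d n; simp [pvVocabFrom]
  | cons z zs ih =>
    intro d n
    simp only [List.foldl_cons, ih, pv_getD_stepA, pvVocabFrom]

theorem pv_nodup_keys_fold (ln : List String) (zs : List (String × Int)) :
    ((zs.foldl (pvStepA ln) PySem.Dict.empty).keys).Nodup := by
  rw [pv_keys_fold, PySem.Dict.keys_empty, PySem.Set.update_nil_left]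
  exact PySem.Set.nodup_ofList _

-- ===== VERDICT (by name: the statement is the Claim_ definition above) =====
theorem compute_class_vocabularies_spec : Claim_equal_compute_class_vocabularies := by
  intro texts labels label_names _ _
  unfold Spec_compute_class_vocabularies compute_class_vocabularies compute_class_vocabularies_alt
  rw [PySem.Dict.items_eq_map_keys _ (pv_nodup_keys_fold _ _) PySem.Set.empty,
    pv_keys_fold, PySem.Dict.keys_empty, PySem.Set.update_nil_left]
  simp only [PySem.List.dedup_eq_ofList]
  refine List.map_congr_left ?_
  intro n _
  rw [pv_getD_fold, PySem.Dict.getD_empty]
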